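-- pv_equiv track=rewrite | github.com/odeke-em/crawlers | classifier/classifier.py | getWordDict
-- ===== SOURCE A (Python) =====
-- def getWordDict(word):
--     # Returns a map of letters in a word
--     # with their occuring indices as values
--     wordDict = dict()
--     for i in range(len(word)):
--         ch = word[i]
--         chDict = wordDict.get(ch, dict())
--         chDict[i] = i
--         wordDict[ch] = chDict
--
--     return wordDict
-- ===== SOURCE B (Python) =====
-- def getWordDict(word):
--     # One dict comprehension: distinct letters in first-occurrence order,
--     # each mapped to the dict of its indices found by scanning the word.
--     return {ch: {i: i for i, c in enumerate(word) if c == ch}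
--             for ch in dict.fromkeys(word)}
-- ===== Notes on version B (the rewrite author's own statement) =====
-- stated objective: idiomatic
-- what changed: Replaces A's single index-loop with get/insert dict updates by a nested dict comprehension: distinct letters first (dict.fromkeys), then one filtering scan of enumerate(word) per letter.
import Mathlib
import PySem

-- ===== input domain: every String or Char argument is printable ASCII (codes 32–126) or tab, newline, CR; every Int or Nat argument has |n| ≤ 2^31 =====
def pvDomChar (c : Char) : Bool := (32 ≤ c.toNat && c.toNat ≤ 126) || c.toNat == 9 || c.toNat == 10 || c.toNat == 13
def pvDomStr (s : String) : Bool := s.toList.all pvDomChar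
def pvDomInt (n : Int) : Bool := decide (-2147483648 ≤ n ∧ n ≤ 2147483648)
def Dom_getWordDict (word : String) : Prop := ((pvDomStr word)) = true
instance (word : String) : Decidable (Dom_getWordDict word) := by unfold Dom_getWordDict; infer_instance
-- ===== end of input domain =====

-- B replaces A's single grouping loop by a nested dict comprehension (distinct letters first,
-- then one filtering scan of the word per letter); objective: idiomatic, same return value.

-- ===== PORT A =====
-- for i in range(len(word)): ch = word[i]; chDict = wordDict.get(ch, {}); chDict[i] = i; wordDict[ch] = chDict
-- (the loop over i with ch = word[i] is the fold over enumerate(word.toList); the nested dicts are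
-- PySem.Dict, rendered as items lists at the end per the dict -> association-list convention)
def getWordDict (word : String) : List (String × List (Int × Int)) :=
  let wordDict : PySem.Dict String (PySem.Dict Int Int) :=
    (PySem.List.enumerate word.toList 0).foldl
      (fun wd p =>
        wd.insert (String.ofList [p.2]) ((wd.getD (String.ofList [p.2]) PySem.Dict.empty).insert p.1 p.1))
      PySem.Dict.empty
  wordDict.items.map (fun q => (q.1, q.2.items))

-- ===== PORT B =====
-- {ch: {i: i for i, c in enumerate(word) if c == ch} for ch in dict.fromkeys(word)}
-- (dict.fromkeys is PySem.List.dedup; the inner comprehension's keys are the distinct filtered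
-- indices in order, so that dict is exactly the filtered pair list)
def getWordDict_alt (word : String) : List (String × List (Int × Int)) :=
  (PySem.List.dedup word.toList).map (fun ch =>
    (String.ofList [ch],
     ((PySem.List.enumerate word.toList 0).filter (fun p => p.2 == ch)).map
       (fun p => (p.1, p.1))))

-- ===== PRECONDITION & SPEC =====
def Spec_getWordDict (word : String) (out : List (String × List (Int × Int))) : Prop := out = getWordDict_alt word
instance (word : String) (out : List (String × List (Int × Int))) : Decidable (Spec_getWordDict word out) := by unfold Spec_getWordDict; infer_instance

-- ===== CLAIM (what is proved, stated in full; the proofs are below) =====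
def Claim_equal_getWordDict : Prop := ∀ (word : String), Dom_getWordDict word → Spec_getWordDict word (getWordDict word)

-- ===== LEMMAS AND PROOFS =====

theorem mkKey_injective : Function.Injective (fun c : Char => String.ofList [c]) := by
  intro a b h
  have := congrArg String.toList h
  simpa using this

theorem dedup_map_of_injective {α β : Type} [DecidableEq α] [DecidableEq β]
    (f : α → β) (hf : Function.Injective f) (xs : List α) :
    PySem.List.dedup (xs.map f) = (PySem.List.dedup xs).map f := by
  induction xs with
  | nil => rfl
  | cons x xs ih =>
    simp only [PySem.List.dedup_eq_ofList, List.map_cons, PySem.Set.ofList_cons] at *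
    rw [ih]
    simp only [PySem.Set.discard, List.filter_map]
    congr 1
    congr 1
    apply List.filter_congr
    intro a _
    simp [hf.eq_iff]

theorem getD_foldl_step (l : List (Int × Char)) (d0 : PySem.Dict String (PySem.Dict Int Int)) (ch : Char) :
    ((l.foldl (fun wd p =>
        wd.insert (String.ofList [p.2]) ((wd.getD (String.ofList [p.2]) PySem.Dict.empty).insert p.1 p.1)) d0).getD
          (String.ofList [ch]) PySem.Dict.empty)
    = (l.filter (fun p => p.2 == ch)).foldl (fun cd p => cd.insert p.1 p.1)
        (d0.getD (String.ofList [ch]) PySem.Dict.empty) := by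
  induction l generalizing d0 with
  | nil => rfl
  | cons p l ih =>
    rw [List.foldl_cons, ih, List.filter_cons]
    by_cases h : p.2 = ch
    · subst h
      simp [PySem.Dict.getD_insert_self]
    · have hne : String.ofList [ch] ≠ String.ofList [p.2] := fun he => h (mkKey_injective he).symm
      rw [PySem.Dict.getD_insert, if_neg hne]
      simp [h]

theorem items_inner (l : List (Int × Char)) (h : (l.map (·.1)).Nodup) :
    (l.foldl (fun cd p => cd.insert p.1 p.1) (PySem.Dict.empty : PySem.Dict Int Int)).items
    = l.map (fun p => (p.1, p.1)) := by
  have := PySem.Dict.items_foldl_insert_fresh (l := l) (k := fun p => p.1) (v := fun p => p.1)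
    (d := PySem.Dict.empty) (by intro a _; simp [PySem.Dict.contains_empty]) h
  simpa using this

theorem main_eq (word : String) :
    (((PySem.List.enumerate word.toList 0).foldl
      (fun wd p => wd.insert (String.ofList [p.2]) ((wd.getD (String.ofList [p.2]) PySem.Dict.empty).insert p.1 p.1))
      PySem.Dict.empty).items.map (fun q => (q.1, q.2.items)))
    = (PySem.List.dedup word.toList).map (fun ch =>
        (String.ofList [ch],
         ((PySem.List.enumerate word.toList 0).filter (fun p => p.2 == ch)).map (fun p => (p.1, p.1)))) := by
  set l := PySem.List.enumerate word.toList 0 with hl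
  set d := l.foldl
      (fun wd p => wd.insert (String.ofList [p.2]) ((wd.getD (String.ofList [p.2]) PySem.Dict.empty).insert p.1 p.1))
      PySem.Dict.empty with hd
  have hnd : d.keys.Nodup := by
    rw [hd]
    exact PySem.Dict.nodup_keys_foldl_insert_key l (fun p => String.ofList [p.2]) _ _ PySem.Dict.nodup_keys_empty
  have hkeys : d.keys = (PySem.List.dedup word.toList).map (fun c => String.ofList [c]) := by
    rw [hd, PySem.Dict.keys_foldl_insert_key]
    have h1 : l.map (fun p => String.ofList [p.2]) = (word.toList).map (fun c => String.ofList [c]) := by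
      rw [hl]
      rw [show (fun p : Int × Char => String.ofList [p.2]) = (fun c : Char => String.ofList [c]) ∘ (fun p : Int × Char => p.2) from rfl]
      rw [← List.map_map, PySem.List.map_snd_enumerate]
    calc PySem.Set.update (PySem.Dict.empty : PySem.Dict String (PySem.Dict Int Int)).keys
            (l.map (fun p => String.ofList [p.2]))
        = PySem.Set.ofList ((word.toList).map (fun c => String.ofList [c])) := by
          rw [h1]; rfl
      _ = (PySem.List.dedup word.toList).map (fun c => String.ofList [c]) := by
          rw [← PySem.List.dedup_eq_ofList]
          exact dedup_map_of_injective _ mkKey_injective _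
  rw [PySem.Dict.items_eq_map_keys d hnd PySem.Dict.empty, hkeys, List.map_map, List.map_map]
  apply List.map_congr_left
  intro ch hch
  simp only [Function.comp]
  simp only [Prod.mk.injEq, true_and]
  rw [hd, getD_foldl_step]
  have hempty : (PySem.Dict.empty : PySem.Dict String (PySem.Dict Int Int)).getD (String.ofList [ch]) PySem.Dict.empty = PySem.Dict.empty := rfl
  rw [hempty, items_inner]
  have hp : l.Pairwise (fun p q => p.1 < q.1) := PySem.List.pairwise_lt_enumerate _ _
  have hp2 : (l.filter (fun p => p.2 == ch)).Pairwise (fun p q => p.1 < q.1) := hp.filter _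
  rw [List.Nodup, List.pairwise_map]
  exact hp2.imp (fun h => ne_of_lt h)

-- ===== VERDICT (by name: the statement is the Claim_ definition above) =====
theorem getWordDict_spec : Claim_equal_getWordDict := by
  intro word _
  unfold Spec_getWordDict getWordDict getWordDict_alt
  exact main_eq word
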